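-- pv_equiv track=rewrite | github.com/ChrysanKwon/Mahjong | Mahjong_discard/Mahjong_yaku.py | Nine_gates
-- ===== SOURCE A (Python) =====
-- from copy import copy
--
-- def Nine_gates(hand):
--     #萬筒條聽9張的情況
--     nine={'ninem':[18,18,18,19,20,21,22,23,24,25,26,26,26],
--     'nines':[9,9,9,10,11,12,13,14,15,16,17,17,17],
--     'ninep':[0,0,0,1,2,3,4,5,6,7,8,8,8]}
--     countarray=[]
--     discardarray=[]
--     for yaku in nine:
--         discard=copy(hand)
--         count=0
--         for tile in nine[yaku]:
--             if tile in discard: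
--                 discard.remove(tile)
--                 count+=1
--             else:
--                 pass
--         for tile in nine[yaku]:
--             if tile in discard:
--                 discard.remove(tile)
--                 count+=1
--                 break
--             else:
--                 pass
--         countarray.append(count)
--         discardarray.append(discard)
--     return max(countarray),discardarray[countarray.index(max(countarray))]
-- ===== SOURCE B (Python) =====
-- def Nine_gates(hand):
--     patterns = [
--         [18, 18, 18, 19, 20, 21, 22, 23, 24, 25, 26, 26, 26],
--         [9, 9, 9, 10, 11, 12, 13, 14, 15, 16, 17, 17, 17],
--         [0, 0, 0, 1, 2, 3, 4, 5, 6, 7, 8, 8, 8],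
--     ]
--     cnt = {}
--     for x in hand:
--         cnt[x] = cnt.get(x, 0) + 1
--     best = None
--     for pat in patterns:
--         pc = {}
--         for t in pat:
--             pc[t] = pc.get(t, 0) + 1
--         # per-tile budget of occurrences the pattern consumes from the hand
--         need = {}
--         for t, c in pc.items():
--             need[t] = min(cnt.get(t, 0), c)
--         # the single extra tile: first pattern tile with a surplus in the hand
--         for t, c in pc.items():
--             if cnt.get(t, 0) > c:
--                 need[t] += 1
--                 break
--         leftover = []
--         for x in hand:
--             if need.get(x, 0) > 0:
--                 need[x] = need[x] - 1
--             else: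
--                 leftover.append(x)
--         count = len(hand) - len(leftover)
--         if best is None or count > best[0]:
--             best = (count, leftover)
--     return best
-- ===== Notes on version B (the rewrite author's own statement) =====
-- stated objective: alternative
-- what changed: B replaces A's per-pattern copy + repeated `in`-membership/`remove` scans and second break-loop by hand/pattern occurrence counters, a first-surplus-tile lookup over the distinct pattern tiles, and a single budget-consuming pass over the hand, keeping the best result with a running first-max instead of max()+index(); asymptotically O(n+k) vs O(k*n) per pattern, but A's C-level list scans win on constants, so no speed is claimed.
import Mathlib
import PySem

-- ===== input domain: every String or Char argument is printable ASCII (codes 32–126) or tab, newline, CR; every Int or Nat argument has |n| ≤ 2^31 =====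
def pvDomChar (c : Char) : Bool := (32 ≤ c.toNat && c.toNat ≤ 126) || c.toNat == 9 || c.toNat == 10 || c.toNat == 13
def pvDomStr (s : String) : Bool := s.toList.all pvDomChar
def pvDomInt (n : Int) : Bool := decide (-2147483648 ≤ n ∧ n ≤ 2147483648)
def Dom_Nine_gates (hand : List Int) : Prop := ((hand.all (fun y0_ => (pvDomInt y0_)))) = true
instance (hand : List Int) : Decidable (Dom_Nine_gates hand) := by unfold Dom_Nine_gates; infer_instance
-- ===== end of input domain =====

-- B replaces A's repeated `in`/`remove` scans by hand/pattern counters and a single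
-- budget-consuming pass over the hand (objective: alternative algorithm, same result).

-- ===== PORT A =====
-- first loop body: `if tile in discard: discard.remove(tile); count += 1`
def pvA_step (s : List Int × Int) (t : Int) : List Int × Int :=
  match PySem.List.remove? s.1 t with
  | some d' => (d', s.2 + 1)
  | none => s

-- second loop with `break`: remove (at most) one more pattern tile
def pvA_break : List Int → List Int → Int → List Int × Int
  | [], d, c => (d, c)
  | t :: ts, d, c =>
    match PySem.List.remove? d t with
    | some d' => (d', c + 1)
    | none => pvA_break ts d c

-- one iteration of `for yaku in nine`
def pvA_run (hand pat : List Int) : Int × List Int :=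
  let s := pat.foldl pvA_step (hand, 0)
  let r := pvA_break pat s.1 s.2
  (r.2, r.1)

def Nine_gates (hand : List Int) : Int × List Int :=
  let r1 := pvA_run hand [18, 18, 18, 19, 20, 21, 22, 23, 24, 25, 26, 26, 26]
  let r2 := pvA_run hand [9, 9, 9, 10, 11, 12, 13, 14, 15, 16, 17, 17, 17]
  let r3 := pvA_run hand [0, 0, 0, 1, 2, 3, 4, 5, 6, 7, 8, 8, 8]
  let countarray := [r1.1, r2.1, r3.1]
  let discardarray := [r1.2, r2.2, r3.2]
  let m := (PySem.List.max? countarray (fun x => x)).getD 0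
  let i := (PySem.List.index? countarray m).getD 0
  (m, discardarray.getD i [])

-- ===== PORT B =====
-- `cnt = {}; for x in xs: cnt[x] = cnt.get(x, 0) + 1`
def pvB_count (xs : List Int) : PySem.Dict Int Int :=
  xs.foldl (fun d x => d.insert x (d.getD x 0 + 1)) PySem.Dict.empty

-- `need = {}; for t, c in pc.items(): need[t] = min(cnt.get(t, 0), c)`
def pvB_need (cnt : PySem.Dict Int Int) (items : List (Int × Int)) : PySem.Dict Int Int :=
  items.foldl (fun d p => d.insert p.1 (min (cnt.getD p.1 0) p.2)) PySem.Dict.empty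

-- `for t, c in pc.items(): if cnt.get(t, 0) > c: need[t] += 1; break`
def pvB_extra (cnt : PySem.Dict Int Int) : List (Int × Int) → PySem.Dict Int Int → PySem.Dict Int Int
  | [], need => need
  | p :: rest, need =>
    if cnt.getD p.1 0 > p.2 then need.insert p.1 (need.getD p.1 0 + 1)
    else pvB_extra cnt rest need

-- loop body of the single budget-consuming pass over the hand
def pvB_consume (s : List Int × PySem.Dict Int Int) (x : Int) : List Int × PySem.Dict Int Int :=
  if s.2.getD x 0 > 0 then (s.1, s.2.insert x (s.2.getD x 0 - 1))
  else (s.1 ++ [x], s.2)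

-- one iteration of `for pat in patterns`
def pvB_run (cnt : PySem.Dict Int Int) (hand pat : List Int) : Int × List Int :=
  let pc := pvB_count pat
  let need := pvB_extra cnt pc.items (pvB_need cnt pc.items)
  let leftover := (hand.foldl pvB_consume ([], need)).1
  ((hand.length : Int) - (leftover.length : Int), leftover)

def Nine_gates_alt (hand : List Int) : Int × List Int :=
  let cnt := pvB_count hand
  let b1 := pvB_run cnt hand [18, 18, 18, 19, 20, 21, 22, 23, 24, 25, 26, 26, 26]
  let b2 := pvB_run cnt hand [9, 9, 9, 10, 11, 12, 13, 14, 15, 16, 17, 17, 17]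
  let b3 := pvB_run cnt hand [0, 0, 0, 1, 2, 3, 4, 5, 6, 7, 8, 8, 8]
  let b := b1
  let b := if b2.1 > b.1 then b2 else b
  let b := if b3.1 > b.1 then b3 else b
  b

-- ===== PRECONDITION & SPEC =====
def Spec_Nine_gates (hand : List Int) (out : Int × List Int) : Prop := out = Nine_gates_alt hand
instance (hand : List Int) (out : Int × List Int) : Decidable (Spec_Nine_gates hand out) := by unfold Spec_Nine_gates; infer_instance

-- ===== CLAIM (what is proved, stated in full; the proofs are below) =====
def Claim_equal_Nine_gates : Prop := ∀ (hand : List Int), Dom_Nine_gates hand → Spec_Nine_gates hand (Nine_gates hand)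

-- ===== LEMMAS AND PROOFS =====

-- pointwise update of an Int-valued budget function
def updF (f : Int → Int) (t v : Int) : Int → Int := fun x => if x = t then v else f x

-- model: drop, per value, the first `f v` occurrences (budget decremented as we go)
def dropB (f : Int → Int) : List Int → List Int
  | [] => []
  | x :: xs => if 0 < f x then dropB (updF f x (f x - 1)) xs else x :: dropB f xs

theorem updF_apply_self (f : Int → Int) (t v : Int) : updF f t v t = v := by simp [updF]

theorem updF_apply_ne (f : Int → Int) (t v x : Int) (h : x ≠ t) : updF f t v x = f x := by
  simp [updF, h]

theorem updF_nonneg (f : Int → Int) (t v : Int) (hf : ∀ x, 0 ≤ f x) (hv : 0 ≤ v) :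
    ∀ x, 0 ≤ updF f t v x := by
  intro x; have := hf x; simp only [updF]; split <;> omega

theorem dropB_zero (h : List Int) : dropB (fun _ => 0) h = h := by
  induction h with
  | nil => rfl
  | cons x xs ih => simp [dropB, ih]

theorem count_dropB (h : List Int) : ∀ (f : Int → Int), (∀ x, 0 ≤ f x) → ∀ v,
    (List.count v (dropB f h) : Int) = (List.count v h : Int) - min (f v) (List.count v h : Int) := by
  induction h with
  | nil => intro f hf v; have := hf v; simp [dropB]; omega
  | cons x xs ih =>
    intro f hf v
    have hfx := hf x
    have hfv := hf v
    by_cases hx : 0 < f x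
    · have hf' : ∀ y, 0 ≤ updF f x (f x - 1) y := updF_nonneg f x (f x - 1) hf (by omega)
      have hih := ih (updF f x (f x - 1)) hf' v
      simp only [dropB, if_pos hx]
      rw [hih]
      by_cases hv : v = x
      · subst hv
        simp only [updF, if_pos rfl, List.count_cons_self]
        push_cast; omega
      · have hne : (x == v) = false := by simp [beq_eq_false_iff_ne]; omega
        simp only [updF, if_neg hv, List.count_cons, hne]
        push_cast; omega
    · have hih := ih f hf v
      simp only [dropB, if_neg hx]
      by_cases hv : v = x
      · subst hv
        simp only [List.count_cons_self]
        push_cast at hih ⊢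
        omega
      · have hne : (x == v) = false := by simp [beq_eq_false_iff_ne]; omega
        simp only [List.count_cons, hne, Bool.false_eq_true, if_false, Nat.add_zero]
        simpa using hih

theorem mem_dropB (h : List Int) (f : Int → Int) (hf : ∀ x, 0 ≤ f x) (t : Int) :
    t ∈ dropB f h ↔ f t < (List.count t h : Int) := by
  rw [← List.count_pos_iff (l := dropB f h)]
  have := count_dropB h f hf t
  have h0 := hf t
  constructor
  · intro hp
    have : (0 : Int) < (List.count t (dropB f h) : Int) := by exact_mod_cast hp
    omega
  · intro hlt
    have : (0 : Int) < (List.count t (dropB f h) : Int) := by omega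
    exact_mod_cast this

theorem erase_dropB (h : List Int) : ∀ (f : Int → Int), (∀ x, 0 ≤ f x) → ∀ t,
    f t < (List.count t h : Int) →
    (dropB f h).erase t = dropB (updF f t (f t + 1)) h := by
  induction h with
  | nil => intro f hf t ht; simp at ht; have := hf t; omega
  | cons x xs ih =>
    intro f hf t ht
    have hfx := hf x
    have hft := hf t
    by_cases hv : x = t
    · subst hv
      simp only [List.count_cons_self] at ht
      push_cast at ht
      by_cases hx : 0 < f x
      · -- budget positive at the head value: head consumed on both sides
        have hf' : ∀ y, 0 ≤ updF f x (f x - 1) y := updF_nonneg f x (f x - 1) hf (by omega)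
        have hcnt : (updF f x (f x - 1)) x < (List.count x xs : Int) := by
          rw [updF_apply_self]; omega
        have hih := ih (updF f x (f x - 1)) hf' x hcnt
        have e1 : updF (updF f x (f x - 1)) x ((updF f x (f x - 1)) x + 1) = f := by
          funext w; by_cases hw : w = x <;> simp [updF, hw]
        have e2 : updF (updF f x (f x + 1)) x ((updF f x (f x + 1)) x - 1) = f := by
          funext w; by_cases hw : w = x <;> simp [updF, hw]
        have hx2 : 0 < updF f x (f x + 1) x := by rw [updF_apply_self]; omega
        simp only [dropB, if_pos hx, if_pos hx2]
        rw [hih, e1, e2]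
      · have hfx0 : f x = 0 := by omega
        have e2 : updF (updF f x (f x + 1)) x ((updF f x (f x + 1)) x - 1) = f := by
          funext w; by_cases hw : w = x <;> simp [updF, hw]
        have hx2 : 0 < updF f x (f x + 1) x := by rw [updF_apply_self]; omega
        simp only [dropB, if_neg hx, List.erase_cons_head, if_pos hx2]
        rw [e2]
    · -- head is a different value
      have hxt : (x == t) = false := by simp [beq_eq_false_iff_ne]; exact hv
      have hcnt : f t < (List.count t xs : Int) := by
        simp only [List.count_cons, hxt, Bool.false_eq_true, if_false, Nat.add_zero] at ht
        exact ht
      by_cases hx : 0 < f x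
      · have hf' : ∀ y, 0 ≤ updF f x (f x - 1) y := updF_nonneg f x (f x - 1) hf (by omega)
        have hcnt' : (updF f x (f x - 1)) t < (List.count t xs : Int) := by
          rw [updF_apply_ne _ _ _ _ (Ne.symm hv)]; exact hcnt
        have hih := ih (updF f x (f x - 1)) hf' t hcnt'
        simp only [dropB, if_pos hx]
        rw [hih]
        have hx2 : 0 < updF f t (f t + 1) x := by rw [updF_apply_ne _ _ _ _ hv]; omega
        simp only [dropB, if_pos hx2]
        congr 1
        funext w
        by_cases h1 : w = x <;> by_cases h2 : w = t <;>
          simp_all [updF, Ne.symm hv]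
      · have hih := ih f hf t hcnt
        simp only [dropB, if_neg hx]
        rw [List.erase_cons_tail (by simpa using hv)]
        rw [hih]
        have hx2 : ¬ 0 < updF f t (f t + 1) x := by rw [updF_apply_ne _ _ _ _ hv]; omega
        simp only [dropB, if_neg hx2]

theorem consume_dropB (h : List Int) : ∀ (need : PySem.Dict Int Int) (acc : List Int),
    (h.foldl pvB_consume (acc, need)).1 = acc ++ dropB (fun v => need.getD v 0) h := by
  induction h with
  | nil => intro need acc; simp [dropB]
  | cons x xs ih =>
    intro need acc
    simp only [List.foldl_cons]
    by_cases hx : need.getD x 0 > 0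
    · have hstep : pvB_consume (acc, need) x = (acc, need.insert x (need.getD x 0 - 1)) := by
        simp [pvB_consume, hx]
      rw [hstep, ih]
      have : (fun v => (need.insert x (need.getD x 0 - 1)).getD v 0)
          = updF (fun v => need.getD v 0) x (need.getD x 0 - 1) := by
        funext v; simp [PySem.Dict.getD_insert, updF]
      rw [this]
      simp only [dropB, if_pos hx]
    · have hstep : pvB_consume (acc, need) x = (acc ++ [x], need) := by
        simp [pvB_consume, hx]
      rw [hstep, ih]
      simp only [dropB, if_neg hx]
      simp

theorem pass1_discard (pat : List Int) : ∀ (hand : List Int) (f : Int → Int) (c : Int),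
    (∀ x, 0 ≤ f x) → (∀ x, f x ≤ (List.count x hand : Int)) →
    (pat.foldl pvA_step (dropB f hand, c)).1
      = dropB (fun v => min ((List.count v hand : Int)) (f v + (List.count v pat : Int))) hand := by
  induction pat with
  | nil =>
    intro hand f c hf hfc
    simp only [List.foldl_nil, List.count_nil]
    congr 1; funext v; have := hfc v; push_cast; omega
  | cons t ts ih =>
    intro hand f c hf hfc
    simp only [List.foldl_cons]
    by_cases hin : f t < (List.count t hand : Int)
    · have hmem : t ∈ dropB f hand := (mem_dropB hand f hf t).mpr hin
      have hstep : pvA_step (dropB f hand, c) t = (dropB (updF f t (f t + 1)) hand, c + 1) := by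
        simp only [pvA_step, PySem.List.remove?_eq_some_erase _ _ hmem]
        rw [erase_dropB hand f hf t hin]
      rw [hstep]
      have hf' : ∀ x, 0 ≤ updF f t (f t + 1) x :=
        updF_nonneg f t (f t + 1) hf (by have := hf t; omega)
      have hfc' : ∀ x, updF f t (f t + 1) x ≤ (List.count x hand : Int) := by
        intro x
        by_cases hx : x = t
        · subst hx; rw [updF_apply_self]; omega
        · rw [updF_apply_ne _ _ _ _ hx]; exact hfc x
      rw [ih hand _ (c + 1) hf' hfc']
      congr 1; funext v
      simp only [updF, List.count_cons]
      by_cases hv : v = t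
      · subst hv; simp; push_cast; omega
      · have : (t == v) = false := by simp [beq_eq_false_iff_ne]; omega
        simp [hv, this]
    · have hnm : t ∉ dropB f hand := fun hm => hin ((mem_dropB hand f hf t).mp hm)
      have hstep : pvA_step (dropB f hand, c) t = (dropB f hand, c) := by
        simp only [pvA_step]
        rw [(PySem.List.remove?_eq_none_iff _ _).mpr hnm]
      rw [hstep, ih hand f c hf hfc]
      congr 1; funext v
      simp only [List.count_cons]
      by_cases hv : v = t
      · subst hv; simp
        have h1 := hfc v
        push_cast; omega
      · have : (t == v) = false := by simp [beq_eq_false_iff_ne]; omega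
        simp [this]

theorem pass1_count (pat : List Int) : ∀ (d : List Int) (c : Int),
    (pat.foldl pvA_step (d, c)).2
      = c + (d.length : Int) - ((pat.foldl pvA_step (d, c)).1.length : Int) := by
  induction pat with
  | nil => intro d c; simp
  | cons t ts ih =>
    intro d c
    simp only [List.foldl_cons]
    by_cases hmem : t ∈ d
    · have hstep : pvA_step (d, c) t = (d.erase t, c + 1) := by
        simp [pvA_step, PySem.List.remove?_eq_some_erase _ _ hmem]
      rw [hstep, ih]
      have hlen : (d.erase t).length = d.length - 1 := List.length_erase_of_mem hmem
      have hpos : 1 ≤ d.length := List.length_pos_of_mem hmem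
      rw [hlen]
      push_cast [Nat.cast_sub hpos]
      ring
    · have hstep : pvA_step (d, c) t = (d, c) := by
        simp only [pvA_step]
        rw [(PySem.List.remove?_eq_none_iff _ _).mpr hmem]
      rw [hstep, ih]

theorem break_find (pat : List Int) : ∀ (d : List Int) (c : Int),
    pvA_break pat d c
      = match pat.find? (fun t => decide (t ∈ d)) with
        | some t => (d.erase t, c + 1)
        | none => (d, c) := by
  induction pat with
  | nil => intro d c; simp [pvA_break]
  | cons t ts ih =>
    intro d c
    by_cases hmem : t ∈ d
    · have h1 : List.find? (fun u => decide (u ∈ d)) (t :: ts) = some t :=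
        List.find?_cons_of_pos (by simpa using hmem)
      simp only [pvA_break, PySem.List.remove?_eq_some_erase _ _ hmem, h1]
    · have h1 : List.find? (fun u => decide (u ∈ d)) (t :: ts)
          = List.find? (fun u => decide (u ∈ d)) ts :=
        List.find?_cons_of_neg (by simpa using hmem)
      simp only [pvA_break, (PySem.List.remove?_eq_none_iff _ _).mpr hmem, h1]
      exact ih d c

theorem getD_foldl_insert_keyfun (l : List Int) (g : Int → Int) :
    ∀ (d0 : PySem.Dict Int Int) (v : Int),
    (l.foldl (fun d k => d.insert k (g k)) d0).getD v 0
      = if v ∈ l then g v else d0.getD v 0 := by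
  induction l with
  | nil => intro d0 v; simp
  | cons k ks ih =>
    intro d0 v
    simp only [List.foldl_cons]
    rw [ih]
    by_cases hv : v ∈ ks
    · simp [hv]
    · rw [if_neg hv, PySem.Dict.getD_insert]
      by_cases hvk : v = k
      · subst hvk; simp
      · simp [hv, hvk]

theorem extra_find (cnt : PySem.Dict Int Int) (items : List (Int × Int)) :
    ∀ (need : PySem.Dict Int Int),
    pvB_extra cnt items need
      = match items.find? (fun p => decide (cnt.getD p.1 0 > p.2)) with
        | some p => need.insert p.1 (need.getD p.1 0 + 1)
        | none => need := by
  induction items with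
  | nil => intro need; simp [pvB_extra]
  | cons p rest ih =>
    intro need
    by_cases hp : cnt.getD p.1 0 > p.2
    · have h1 : List.find? (fun q => decide (cnt.getD q.1 0 > q.2)) (p :: rest) = some p :=
        List.find?_cons_of_pos (by simpa using hp)
      simp only [pvB_extra, if_pos hp, h1]
    · have h1 : List.find? (fun q => decide (cnt.getD q.1 0 > q.2)) (p :: rest)
          = List.find? (fun q => decide (cnt.getD q.1 0 > q.2)) rest :=
        List.find?_cons_of_neg (by simpa using hp)
      simp only [pvB_extra, if_neg hp, h1]
      exact ih need

-- Set.update only appends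
theorem update_append (xs : List Int) : ∀ (s : List Int), ∃ t, PySem.Set.update s xs = s ++ t := by
  induction xs with
  | nil => intro s; exact ⟨[], by simp [PySem.Set.update]⟩
  | cons x xs ih =>
    intro s
    have hstep : PySem.Set.update s (x :: xs) = PySem.Set.update (PySem.Set.add s x) xs := rfl
    rw [hstep]
    obtain ⟨t, ht⟩ := ih (PySem.Set.add s x)
    by_cases hc : x ∈ s
    · have : PySem.Set.add s x = s := by
        simp [PySem.Set.add, PySem.Set.contains, hc]
      exact ⟨t, by rw [ht, this]⟩
    · have : PySem.Set.add s x = s ++ [x] := by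
        simp [PySem.Set.add, PySem.Set.contains, hc]
      exact ⟨x :: t, by rw [ht, this]; simp⟩

theorem find?_update (p : Int → Bool) (xs : List Int) : ∀ (s : List Int),
    s.find? p = none → (PySem.Set.update s xs).find? p = xs.find? p := by
  induction xs with
  | nil => intro s hs; exact hs
  | cons x xs ih =>
    intro s hs
    have hstep : PySem.Set.update s (x :: xs) = PySem.Set.update (PySem.Set.add s x) xs := rfl
    rw [hstep]
    by_cases hpx : p x
    · have hnc : x ∉ s := by
        intro hmem
        have := List.find?_eq_none.mp hs x hmem
        exact this hpx
      have hadd : PySem.Set.add s x = s ++ [x] := by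
        simp [PySem.Set.add, PySem.Set.contains, hnc]
      have hfind : (s ++ [x]).find? p = some x := by
        rw [List.find?_append, hs]; simp [hpx]
      obtain ⟨t, ht⟩ := update_append xs (s ++ [x])
      rw [hadd, ht, List.find?_append, hfind]
      simp [List.find?_cons_of_pos hpx]
    · have hadd : (PySem.Set.add s x).find? p = none := by
        by_cases hc : x ∈ s
        · have : PySem.Set.add s x = s := by
            simp [PySem.Set.add, PySem.Set.contains, hc]
          rw [this]; exact hs
        · have : PySem.Set.add s x = s ++ [x] := by
            simp [PySem.Set.add, PySem.Set.contains, hc]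
          rw [this, List.find?_append, hs]
          simp [hpx]
      rw [ih _ hadd, List.find?_cons_of_neg hpx]

theorem find?_ofList (p : Int → Bool) (xs : List Int) :
    (PySem.Set.ofList xs).find? p = xs.find? p := by
  have : PySem.Set.ofList xs = PySem.Set.update [] xs := rfl
  rw [this, find?_update p xs [] rfl]

-- items of the counter dict: distinct values in first-occurrence order, with their counts
theorem counter_items (pat : List Int) :
    (PySem.Dict.counter pat).items
      = (PySem.Set.ofList pat).map (fun t => (t, (List.count t pat : Int))) := by
  have hkeys : (PySem.Dict.counter pat).keys = PySem.Set.ofList pat := by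
    unfold PySem.Dict.counter
    rw [PySem.Dict.keys_foldl_modify pat 0 (fun _ _ => (· + 1)) PySem.Dict.empty]
    rfl
  have hnd : (PySem.Dict.counter pat).keys.Nodup := by
    rw [hkeys]; exact PySem.Set.nodup_ofList pat
  rw [PySem.Dict.items_eq_map_keys _ hnd 0, hkeys]
  apply List.map_congr_left
  intro t _
  rw [PySem.Dict.getD_counter]

theorem pvB_count_eq_counter (xs : List Int) : pvB_count xs = PySem.Dict.counter xs :=
  PySem.Dict.foldl_insert_getD_add_one_eq_counter xs

-- the central per-pattern lemma: one iteration of A's loop = one iteration of B's loop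
theorem run_eq (hand pat : List Int) :
    pvA_run hand pat = pvB_run (pvB_count hand) hand pat := by
  set m : Int → Int := fun v => min ((List.count v hand : Int)) ((List.count v pat : Int)) with hm
  have hm0 : ∀ x, 0 ≤ m x := by
    intro x; rw [hm]; simp only []
    have h1 : (0 : Int) ≤ (List.count x hand : Int) := by positivity
    have h2 : (0 : Int) ≤ (List.count x pat : Int) := by positivity
    omega
  have hmc : ∀ x, m x ≤ (List.count x hand : Int) := by
    intro x; rw [hm]; simp only []; omega
  -- A side, pass 1
  have hd1 : (pat.foldl pvA_step (hand, 0)).1 = dropB m hand := by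
    conv_lhs => rw [← dropB_zero hand]
    rw [pass1_discard pat hand (fun _ => 0) 0 (fun _ => le_refl 0)
      (fun x => by positivity)]
    rw [hm]
    congr 1
    funext v
    omega
  have hc1 : (pat.foldl pvA_step (hand, 0)).2
      = (hand.length : Int) - ((dropB m hand).length : Int) := by
    rw [pass1_count pat hand 0, hd1]; ring
  -- the two find?s agree
  have hpred : (fun t => decide (t ∈ dropB m hand))
      = (fun t => decide (((List.count t pat : Int)) < (List.count t hand : Int))) := by
    funext t
    have h1 := mem_dropB hand m hm0 t
    have h2 : m t = min ((List.count t hand : Int)) ((List.count t pat : Int)) := by rw [hm]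
    simp only [decide_eq_decide, h1, h2]
    omega
  -- B side need dict before the extra loop
  have hneed : ∀ v, (pvB_need (pvB_count hand) (pvB_count pat).items).getD v 0 = m v := by
    intro v
    rw [pvB_count_eq_counter pat, counter_items pat]
    unfold pvB_need
    rw [List.foldl_map]
    rw [getD_foldl_insert_keyfun (PySem.Set.ofList pat)
      (fun t => min ((pvB_count hand).getD t 0) ((List.count t pat : Int))) PySem.Dict.empty v]
    rw [pvB_count_eq_counter hand, hm]
    by_cases hv : v ∈ PySem.Set.ofList pat
    · rw [if_pos hv, PySem.Dict.getD_counter]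
    · rw [if_neg hv]
      have hnp : v ∉ pat := fun hc => hv ((PySem.Set.mem_ofList pat v).mpr hc)
      have h0 : List.count v pat = 0 := List.count_eq_zero.mpr hnp
      have h1 : (0 : Int) ≤ (List.count v hand : Int) := by positivity
      simp only [PySem.Dict.getD_empty, h0]
      simp
  -- B side extra find over the counter items
  have hfindB : ((pvB_count pat).items.find? (fun p => decide ((pvB_count hand).getD p.1 0 > p.2)))
      = (pat.find? (fun t => decide (((List.count t pat : Int)) < (List.count t hand : Int)))).map
          (fun t => (t, (List.count t pat : Int))) := by
    rw [pvB_count_eq_counter pat, counter_items pat, List.find?_map]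
    rw [find?_ofList]
    congr 1
    have hcomp : ((fun p : Int × Int => decide ((pvB_count hand).getD p.1 0 > p.2))
        ∘ fun t => (t, (List.count t pat : Int)))
        = (fun t => decide (((List.count t pat : Int)) < (List.count t hand : Int))) := by
      funext t
      rw [pvB_count_eq_counter hand]
      simp [Function.comp, PySem.Dict.getD_counter, decide_eq_decide]
    rw [hcomp]
  -- now assemble
  simp only [pvA_run, pvB_run]
  rw [break_find pat]
  rw [hd1, hc1, hpred]
  rw [extra_find, hfindB]
  cases hFo : pat.find? (fun t =>
      decide (((List.count t pat : Int)) < (List.count t hand : Int))) with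
  | none =>
    simp only [Option.map_none]
    rw [consume_dropB]
    rw [show (fun v => (pvB_need (pvB_count hand) (pvB_count pat).items).getD v 0) = m
      from funext hneed]
    simp
  | some t =>
    have ht : ((List.count t pat : Int)) < (List.count t hand : Int) := by
      have h := List.find?_some hFo
      simpa using h
    have hmt : m t < (List.count t hand : Int) := by
      rw [hm]; simp only []; omega
    have hmem : t ∈ dropB m hand := (mem_dropB hand m hm0 t).mpr hmt
    have herase := erase_dropB hand m hm0 t hmt
    simp only [Option.map_some]
    rw [consume_dropB]
    have hfun : (fun v => ((pvB_need (pvB_count hand) (pvB_count pat).items).insert t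
        ((pvB_need (pvB_count hand) (pvB_count pat).items).getD t 0 + 1)).getD v 0)
        = updF m t (m t + 1) := by
      funext v
      rw [PySem.Dict.getD_insert]
      by_cases hv : v = t
      · rw [if_pos hv, hneed t, hv, updF_apply_self]
      · rw [if_neg hv, hneed v, updF_apply_ne _ _ _ _ hv]
    rw [hfun, ← herase]
    have hlen : ((dropB m hand).erase t).length = (dropB m hand).length - 1 :=
      List.length_erase_of_mem hmem
    have hpos : 1 ≤ (dropB m hand).length := List.length_pos_of_mem hmem
    simp only [List.nil_append]
    refine Prod.ext ?_ rfl
    simp only []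
    rw [hlen]
    push_cast [Nat.cast_sub hpos]
    ring

theorem select3 (r1 r2 r3 : Int × List Int) :
    ((PySem.List.max? [r1.1, r2.1, r3.1] (fun x => x)).getD 0,
      [r1.2, r2.2, r3.2].getD
        ((PySem.List.index? [r1.1, r2.1, r3.1]
          ((PySem.List.max? [r1.1, r2.1, r3.1] (fun x => x)).getD 0)).getD 0) [])
    = (if r3.1 > (if r2.1 > r1.1 then r2 else r1).1 then r3
        else (if r2.1 > r1.1 then r2 else r1)) := by
  simp only [PySem.List.max?_id_cons, List.foldl_cons, List.foldl_nil, Option.getD_some]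
  by_cases h2 : r2.1 > r1.1
  · rw [if_pos h2]
    by_cases h3 : r3.1 > r2.1
    · rw [if_pos h3]
      rw [show max (max r1.1 r2.1) r3.1 = r3.1 by omega]
      rw [PySem.List.index?_cons_of_ne _ (by omega : r1.1 ≠ r3.1),
          PySem.List.index?_cons_of_ne _ (by omega : r2.1 ≠ r3.1),
          PySem.List.index?_cons_self]
      simp
    · rw [if_neg h3]
      rw [show max (max r1.1 r2.1) r3.1 = r2.1 by omega]
      rw [PySem.List.index?_cons_of_ne _ (by omega : r1.1 ≠ r2.1),
          PySem.List.index?_cons_self]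
      simp
  · rw [if_neg h2]
    by_cases h3 : r3.1 > r1.1
    · rw [if_pos h3]
      rw [show max (max r1.1 r2.1) r3.1 = r3.1 by omega]
      rw [PySem.List.index?_cons_of_ne _ (by omega : r1.1 ≠ r3.1),
          PySem.List.index?_cons_of_ne _ (by omega : r2.1 ≠ r3.1),
          PySem.List.index?_cons_self]
      simp
    · rw [if_neg h3]
      rw [show max (max r1.1 r2.1) r3.1 = r1.1 by omega]
      rw [PySem.List.index?_cons_self]
      simp

-- ===== VERDICT (by name: the statement is the Claim_ definition above) =====
theorem Nine_gates_spec : Claim_equal_Nine_gates := by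
  intro hand _
  show Nine_gates hand = Nine_gates_alt hand
  simp only [Nine_gates, Nine_gates_alt, run_eq]
  exact select3 _ _ _
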